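-- pv_equiv track=rewrite | github.com/bellshade/Python | sorting/heap_sort.py | DFS
-- ===== SOURCE A (Python) =====
-- def DFS(array, i, n, min_till_now):
--     if i < n:
--         x1 = DFS(array, 2*i+1, n, min_till_now)
--         x2 = DFS(array, 2*i+2, n, min_till_now)
--         if array[x1] <= array[min_till_now] and array[x1] <= array[x2]:
--             min_till_now = x1
--         elif array[x2] <= array[x1] and array[x2] <= array[min_till_now]:
--             min_till_now = x2
--         if array[i] < array[min_till_now]:
--             return i
--     return min_till_now
-- ===== SOURCE B (Python) =====
-- def DFS(array, i, n, min_till_now):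
--     # Bottom-up DP: min_till_now is constant through A's recursion and child
--     # indices exceed the parent, so fill a results table from n-1 down to 0.
--     if i >= n:
--         return min_till_now
--     m = min_till_now
--     res = [0] * n
--     for idx in range(n - 1, -1, -1):
--         x1 = res[2 * idx + 1] if 2 * idx + 1 < n else m
--         x2 = res[2 * idx + 2] if 2 * idx + 2 < n else m
--         if array[x1] <= array[m] and array[x1] <= array[x2]:
--             mt = x1
--         elif array[x2] <= array[x1] and array[x2] <= array[m]:
--             mt = x2
--         else:
--             mt = m
--         res[idx] = idx if array[idx] < array[mt] else mt
--     return res[i]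
-- ===== Notes on version B (the rewrite author's own statement) =====
-- stated objective: alternative
-- what changed: Replaces A's post-order recursion over the heap tree with a single backward dynamic-programming loop that fills a results table res[idx] for idx = n-1 down to 0 (children indices exceed the parent, and min_till_now is invariant across A's recursion) and returns res[i].
-- outside the precondition, e.g. on DFS([1, 2], 1, 3, 0): A returns 0, B raises IndexError; on DFS([3, 1], 0, 1, -1): A returns -1, B returns -1; on DFS([1], -2, 1, 0): A raises RecursionError, B raises IndexError
import Mathlib
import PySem

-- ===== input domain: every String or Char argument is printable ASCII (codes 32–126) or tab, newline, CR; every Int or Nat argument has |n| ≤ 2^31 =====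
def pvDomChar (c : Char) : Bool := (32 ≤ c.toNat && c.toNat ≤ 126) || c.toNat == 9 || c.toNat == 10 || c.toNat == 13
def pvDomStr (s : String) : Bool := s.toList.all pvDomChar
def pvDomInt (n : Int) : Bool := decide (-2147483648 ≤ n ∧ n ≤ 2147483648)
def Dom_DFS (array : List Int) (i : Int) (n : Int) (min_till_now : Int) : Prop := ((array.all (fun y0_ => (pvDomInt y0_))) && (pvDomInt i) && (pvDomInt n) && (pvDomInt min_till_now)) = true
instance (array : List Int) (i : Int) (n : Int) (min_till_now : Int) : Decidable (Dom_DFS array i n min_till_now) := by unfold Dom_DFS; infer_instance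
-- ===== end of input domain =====

-- B replaces A's post-order recursion by one backward DP loop filling a results
-- table (alternative decomposition, no speed claim).

-- array[x] (both Pythons): exact on Pre_'s in-range nonnegative indices
def pyg (xs : List Int) (x : Int) : Int := PySem.List.pyGetD xs x 0

-- ===== PORT A =====
-- the '0 ≤ i' conjunct is a totality guard only: Python A recurses forever for i < 0 < n
def DFS (array : List Int) (i : Int) (n : Int) (min_till_now : Int) : Int :=
  if h : 0 ≤ i ∧ i < n then
    let x1 := DFS array (2*i+1) n min_till_now
    let x2 := DFS array (2*i+2) n min_till_now
    let mt :=
      if pyg array x1 ≤ pyg array min_till_now ∧ pyg array x1 ≤ pyg array x2 then x1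
      else if pyg array x2 ≤ pyg array x1 ∧ pyg array x2 ≤ pyg array min_till_now then x2
      else min_till_now
    if pyg array i < pyg array mt then i else mt
  else min_till_now
termination_by (n - i).toNat
decreasing_by all_goals omega

-- ===== PORT B =====
-- loop body of Source B's backward for-loop
def DFS_step (array : List Int) (n : Int) (m : Int) (res : List Int) (idx : Int) : List Int :=
  let x1 := if 2*idx+1 < n then pyg res (2*idx+1) else m
  let x2 := if 2*idx+2 < n then pyg res (2*idx+2) else m
  let mt :=
    if pyg array x1 ≤ pyg array m ∧ pyg array x1 ≤ pyg array x2 then x1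
    else if pyg array x2 ≤ pyg array x1 ∧ pyg array x2 ≤ pyg array m then x2
    else m
  res.set idx.toNat (if pyg array idx < pyg array mt then idx else mt)

def DFS_alt (array : List Int) (i : Int) (n : Int) (min_till_now : Int) : Int :=
  if n ≤ i then min_till_now
  else
    let res := (PySem.List.pyRange (n-1) (-1) (-1)).foldl
      (DFS_step array n min_till_now) (List.replicate n.toNat 0)
    pyg res i

-- ===== PRECONDITION & SPEC =====
-- Pre_ excludes inputs on which Python A raises (RecursionError when i < 0 < n;
-- IndexError when an accessed index reaches past the array, e.g. n > len(array))
-- or where Python's negative-index wraparound (negative min_till_now) makes A's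
-- value an accidental corner; when i ≥ n, A returns min_till_now with no access,
-- so nothing is required there.
def Pre_DFS (array : List Int) (i : Int) (n : Int) (min_till_now : Int) : Prop :=
  i < n → (0 ≤ i ∧ 0 ≤ min_till_now ∧ min_till_now < (array.length : Int) ∧ n ≤ (array.length : Int))
instance (array : List Int) (i : Int) (n : Int) (min_till_now : Int) : Decidable (Pre_DFS array i n min_till_now) := by unfold Pre_DFS; infer_instance
def pvWitness_DFS : List Int × Int × Int × Int := ([3, 1, 2], 0, 3, 0)

def Spec_DFS (array : List Int) (i : Int) (n : Int) (min_till_now : Int) (out : Int) : Prop := out = DFS_alt array i n min_till_now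
instance (array : List Int) (i : Int) (n : Int) (min_till_now : Int) (out : Int) : Decidable (Spec_DFS array i n min_till_now out) := by unfold Spec_DFS; infer_instance

-- ===== CLAIM (what is proved, stated in full; the proofs are below) =====
def Claim_equal_DFS : Prop := ∀ (array : List Int) (i : Int) (n : Int) (min_till_now : Int), Dom_DFS array i n min_till_now → Pre_DFS array i n min_till_now → Spec_DFS array i n min_till_now (DFS array i n min_till_now)

-- ===== LEMMAS AND PROOFS =====

lemma DFS_not_lt (array : List Int) (i n m : Int) (h : ¬(0 ≤ i ∧ i < n)) :
    DFS array i n m = m := by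
  rw [DFS]; exact dif_neg h

-- the table entry written at idx is exactly A's recursive value at idx
lemma step_spec (array : List Int) (n m : Int) (res : List Int) (idx : Nat)
    (hidx : (idx : Int) < n) (hlen : res.length = n.toNat)
    (hinv : ∀ j : Nat, idx < j → j < n.toNat → res.getD j 0 = DFS array j n m) :
    (DFS_step array n m res idx).length = n.toNat ∧
    ∀ j : Nat, idx ≤ j → j < n.toNat → (DFS_step array n m res idx).getD j 0 = DFS array j n m := by
  have hx1 : (if 2*(idx:Int)+1 < n then pyg res (2*(idx:Int)+1) else m)
      = DFS array (2*(idx:Int)+1) n m := by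
    split_ifs with h1
    · have e : (2*(idx:Int)+1) = ((2*idx+1 : Nat) : Int) := by push_cast; ring
      rw [e]
      have : pyg res ((2*idx+1 : Nat) : Int) = res.getD (2*idx+1) 0 := by
        simp only [pyg]; rw [PySem.List.pyGetD_natCast]
      rw [this, hinv (2*idx+1) (by omega) (by omega)]
    · rw [DFS_not_lt array _ n m (by omega)]
  have hx2 : (if 2*(idx:Int)+2 < n then pyg res (2*(idx:Int)+2) else m)
      = DFS array (2*(idx:Int)+2) n m := by
    split_ifs with h1
    · have e : (2*(idx:Int)+2) = ((2*idx+2 : Nat) : Int) := by push_cast; ring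
      rw [e]
      have : pyg res ((2*idx+2 : Nat) : Int) = res.getD (2*idx+2) 0 := by
        simp only [pyg]; rw [PySem.List.pyGetD_natCast]
      rw [this, hinv (2*idx+2) (by omega) (by omega)]
    · rw [DFS_not_lt array _ n m (by omega)]
  have key : DFS_step array n m res (idx:Int) = res.set ((idx:Int)).toNat (DFS array (idx:Int) n m) := by
    conv_rhs => rw [DFS]
    rw [dif_pos ⟨Int.natCast_nonneg idx, hidx⟩]
    simp only [DFS_step]
    rw [hx1, hx2]
  constructor
  · rw [key]; simp [hlen]
  · intro j hj1 hj2
    rw [key]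
    have htn : ((idx:Int)).toNat = idx := Int.toNat_natCast idx
    rw [htn]
    by_cases hje : j = idx
    · subst hje
      rw [List.getD_eq_getElem?_getD, List.getElem?_set_self (by omega)]
      rfl
    · rw [List.getD_eq_getElem?_getD, List.getElem?_set_ne (Ne.symm hje),
        ← List.getD_eq_getElem?_getD, hinv j (by omega) hj2]

-- fold invariant: after processing indices s-1 … 0 every table entry below n holds A's value
lemma build_inv (array : List Int) (n m : Int) :
    ∀ (s : Nat) (res : List Int), (s : Int) ≤ n → res.length = n.toNat →
      (∀ j : Nat, s ≤ j → j < n.toNat → res.getD j 0 = DFS array j n m) →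
      ∀ j : Nat, j < n.toNat →
        ((PySem.List.pyRange ((s : Int)-1) (-1) (-1)).foldl (DFS_step array n m) res).getD j 0
          = DFS array j n m := by
  intro s
  induction s with
  | zero =>
    intro res hs hlen hinv j hj
    rw [show ((0:Nat):Int) - 1 = -1 by norm_num,
      PySem.List.pyRange_neg_one_eq_nil (le_refl (-1))]
    exact hinv j (Nat.zero_le j) hj
  | succ s ih =>
    intro res hs hlen hinv j hj
    have hsn : (s : Int) < n := by push_cast at hs ⊢; omega
    have hcons : PySem.List.pyRange (((s+1:Nat) : Int)-1) (-1) (-1)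
        = (s : Int) :: PySem.List.pyRange ((s:Int)-1) (-1) (-1) := by
      have e : ((s+1:Nat) : Int) - 1 = (s : Int) := by push_cast; ring
      rw [e, PySem.List.pyRange_neg_one_cons (by omega)]
    rw [hcons, List.foldl_cons]
    obtain ⟨hL, hV⟩ := step_spec array n m res s hsn hlen
      (fun j h1 h2 => hinv j (by omega) h2)
    exact ih (DFS_step array n m res (s:Int)) (by omega) hL
      (fun j h1 h2 => hV j h1 h2) j hj

-- ===== VERDICT (by name: the statement is the Claim_ definition above) =====

theorem DFS_spec : Claim_equal_DFS := by
  intro array i n m hdom hpre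
  unfold Spec_DFS DFS_alt
  by_cases hin : i < n
  · obtain ⟨hi0, hm0, hmlen, hnlen⟩ := hpre hin
    rw [if_neg (by omega)]
    have hcount : ((n.toNat : Nat) : Int) = n := Int.toNat_of_nonneg (by omega)
    have hb := build_inv array n m n.toNat (List.replicate n.toNat 0) (by omega)
      (by simp) (fun j h1 h2 => absurd h2 (by omega))
    rw [hcount] at hb
    have hiN : i = ((i.toNat : Nat) : Int) := (Int.toNat_of_nonneg hi0).symm
    have hpg : pyg ((PySem.List.pyRange (n-1) (-1) (-1)).foldl
        (DFS_step array n m) (List.replicate n.toNat 0)) i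
        = ((PySem.List.pyRange (n-1) (-1) (-1)).foldl
        (DFS_step array n m) (List.replicate n.toNat 0)).getD i.toNat 0 := by
      conv_lhs => rw [hiN]
      simp only [pyg]; rw [PySem.List.pyGetD_natCast]
    rw [hpg, hb i.toNat (by omega)]
    conv_lhs => rw [hiN]
  · rw [if_pos (by omega), DFS_not_lt array i n m (by omega)]
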